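-- pv_equiv track=rewrite | github.com/DAleid/React_RAN_optimization | tools/reasoning_llm.py | _keyword_cell_fallback
-- ===== SOURCE A (Python) =====
-- def _keyword_cell_fallback(intent_type: str) -> list:
--     """Keyword-based fallback when LLM is unavailable."""
--     t = intent_type.lower()
--     if any(k in t for k in ["emergency", "hospital", "healthcare", "medical", "surgery", "ambulance", "rescue"]):
--         return ["C05", "C02", "C01"]
--     if any(k in t for k in ["stadium", "concert", "match", "festival", "crowd", "event", "pilgrim", "gathering"]):
--         return ["C04", "C01", "C08"]
--     if any(k in t for k in ["iot", "sensor", "factory", "industrial", "robot", "scada", "agriculture", "farm"]):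
--         return ["C06", "C03", "C10"]
--     if any(k in t for k in ["transport", "vehicle", "highway", "drone", "traffic", "autonomous", "v2x"]):
--         return ["C01", "C02", "C03", "C07"]
--     if any(k in t for k in ["gaming", "esport", "stream", "video", "conference"]):
--         return ["C07", "C01", "C09"]
--     return ["C01", "C02", "C03"]
-- ===== SOURCE B (Python) =====
-- GROUPS = [
--     ["emergency", "hospital", "healthcare", "medical", "surgery", "ambulance", "rescue"],
--     ["stadium", "concert", "match", "festival", "crowd", "event", "pilgrim", "gathering"],
--     ["iot", "sensor", "factory", "industrial", "robot", "scada", "agriculture", "farm"],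
--     ["transport", "vehicle", "highway", "drone", "traffic", "autonomous", "v2x"],
--     ["gaming", "esport", "stream", "video", "conference"],
-- ]
--
-- CELLS = [
--     ["C05", "C02", "C01"],
--     ["C04", "C01", "C08"],
--     ["C06", "C03", "C10"],
--     ["C01", "C02", "C03", "C07"],
--     ["C07", "C01", "C09"],
--     ["C01", "C02", "C03"],  # default when no keyword matches
-- ]
--
-- # one flat keyword -> priority map (lower index = higher priority)
-- KEYWORD_PRIORITY = [(k, i) for i, kws in enumerate(GROUPS) for k in kws]
--
--
-- def _keyword_cell_fallback(intent_type: str) -> list: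
--     """Keyword-based fallback when LLM is unavailable.
--
--     Instead of testing rule groups one after another, scan the flat keyword
--     map once and keep the best (smallest) priority of any keyword occurring
--     in the text; index the answer table with it (len(GROUPS) = default)."""
--     t = intent_type.lower()
--     g = len(GROUPS)
--     for k, gi in KEYWORD_PRIORITY:
--         if gi < g and k in t:
--             g = gi
--     return CELLS[g]
-- ===== Notes on version B (the rewrite author's own statement) =====
-- stated objective: alternative
-- what changed: A tests five keyword groups sequentially with an early-returning if-chain; B flattens all keywords into one keyword->priority list, makes a single pass keeping the minimum priority of any keyword found in the text, and indexes a table of answers with it (priority 5 = default).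
import Mathlib
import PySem

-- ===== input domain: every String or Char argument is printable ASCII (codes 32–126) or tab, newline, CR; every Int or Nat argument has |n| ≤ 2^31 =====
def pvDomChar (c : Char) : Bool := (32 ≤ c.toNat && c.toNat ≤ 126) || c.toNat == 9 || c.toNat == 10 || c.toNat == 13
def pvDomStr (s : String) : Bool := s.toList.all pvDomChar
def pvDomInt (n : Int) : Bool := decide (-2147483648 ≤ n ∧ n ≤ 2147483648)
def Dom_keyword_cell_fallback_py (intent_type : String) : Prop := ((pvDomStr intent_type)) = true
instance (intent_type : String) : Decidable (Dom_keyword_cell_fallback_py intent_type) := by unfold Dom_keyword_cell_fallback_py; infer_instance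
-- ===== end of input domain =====

-- B replaces A's sequential group-by-group if-chain by a single pass over one flat
-- keyword->priority map keeping the minimum matched priority; same cost, same results.

-- ===== PORT A =====
def keyword_cell_fallback_py (intent_type : String) : List String :=
  let t := PySem.Str.lower intent_type
  if ["emergency", "hospital", "healthcare", "medical", "surgery", "ambulance", "rescue"].any
      (fun k => PySem.Str.isIn k t) then ["C05", "C02", "C01"]
  else if ["stadium", "concert", "match", "festival", "crowd", "event", "pilgrim", "gathering"].any
      (fun k => PySem.Str.isIn k t) then ["C04", "C01", "C08"]
  else if ["iot", "sensor", "factory", "industrial", "robot", "scada", "agriculture", "farm"].any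
      (fun k => PySem.Str.isIn k t) then ["C06", "C03", "C10"]
  else if ["transport", "vehicle", "highway", "drone", "traffic", "autonomous", "v2x"].any
      (fun k => PySem.Str.isIn k t) then ["C01", "C02", "C03", "C07"]
  else if ["gaming", "esport", "stream", "video", "conference"].any
      (fun k => PySem.Str.isIn k t) then ["C07", "C01", "C09"]
  else ["C01", "C02", "C03"]

-- ===== PORT B =====
def pvGroups : List (List String) :=
  [ ["emergency", "hospital", "healthcare", "medical", "surgery", "ambulance", "rescue"],
    ["stadium", "concert", "match", "festival", "crowd", "event", "pilgrim", "gathering"],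
    ["iot", "sensor", "factory", "industrial", "robot", "scada", "agriculture", "farm"],
    ["transport", "vehicle", "highway", "drone", "traffic", "autonomous", "v2x"],
    ["gaming", "esport", "stream", "video", "conference"] ]

def pvCells : List (List String) :=
  [ ["C05", "C02", "C01"],
    ["C04", "C01", "C08"],
    ["C06", "C03", "C10"],
    ["C01", "C02", "C03", "C07"],
    ["C07", "C01", "C09"],
    ["C01", "C02", "C03"] ]

-- KEYWORD_PRIORITY = [(k, i) for i, kws in enumerate(GROUPS) for k in kws]
def pvKeywordPriority : List (String × Nat) :=
  (PySem.List.enumerate pvGroups).flatMap (fun p => p.2.map (fun k => (k, p.1.toNat)))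

-- the loop body: if gi < g and k in t: g = gi
def pvStep (t : String) (g : Nat) (p : String × Nat) : Nat :=
  if p.2 < g ∧ PySem.Str.isIn p.1 t = true then p.2 else g

def keyword_cell_fallback_py_alt (intent_type : String) : List String :=
  let t := PySem.Str.lower intent_type
  let g := pvKeywordPriority.foldl (pvStep t) pvGroups.length
  -- CELLS[g]: g is always in range (0..5), so the plain in-range index is exact
  pvCells.getD g []

-- ===== PRECONDITION & SPEC =====
def Spec_keyword_cell_fallback_py (intent_type : String) (out : List String) : Prop := out = keyword_cell_fallback_py_alt intent_type
instance (intent_type : String) (out : List String) : Decidable (Spec_keyword_cell_fallback_py intent_type out) := by unfold Spec_keyword_cell_fallback_py; infer_instance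

-- ===== CLAIM (what is proved, stated in full; the proofs are below) =====
def Claim_equal_keyword_cell_fallback_py : Prop := ∀ (intent_type : String), Dom_keyword_cell_fallback_py intent_type → Spec_keyword_cell_fallback_py intent_type (keyword_cell_fallback_py intent_type)

-- ===== LEMMAS AND PROOFS =====

-- folding the step over one group of keywords that all carry the same priority i
lemma pv_fold_const_group (t : String) (i : Nat) (ks : List String) (acc : Nat) :
    (ks.map (fun k => (k, i))).foldl (pvStep t) acc =
      if ks.any (fun k => PySem.Str.isIn k t) then min acc i else acc := by
  induction ks generalizing acc with
  | nil => simp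
  | cons k ks ih =>
    rw [List.map_cons, List.foldl_cons, ih]
    by_cases h : PySem.Str.isIn k t = true
    · have hstep : pvStep t acc (k, i) = min acc i := by
        simp only [pvStep, h, and_true]
        split_ifs <;> omega
      rw [hstep, List.any_cons, h, Bool.true_or, if_pos rfl]
      split_ifs <;> omega
    · have hf : PySem.Str.isIn k t = false := by
        revert h; cases PySem.Str.isIn k t <;> simp
      have hstep : pvStep t acc (k, i) = acc := by
        simp only [pvStep, hf, Bool.false_eq_true, and_false, if_false]
      rw [hstep, List.any_cons, hf, Bool.false_or]

lemma pv_priority_eq :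
    pvKeywordPriority =
      (["emergency", "hospital", "healthcare", "medical", "surgery", "ambulance", "rescue"].map (fun k => (k, 0)))
      ++ (["stadium", "concert", "match", "festival", "crowd", "event", "pilgrim", "gathering"].map (fun k => (k, 1)))
      ++ (["iot", "sensor", "factory", "industrial", "robot", "scada", "agriculture", "farm"].map (fun k => (k, 2)))
      ++ (["transport", "vehicle", "highway", "drone", "traffic", "autonomous", "v2x"].map (fun k => (k, 3)))
      ++ (["gaming", "esport", "stream", "video", "conference"].map (fun k => (k, 4))) := by
  rfl

-- ===== VERDICT (by name: the statement is the Claim_ definition above) =====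
theorem keyword_cell_fallback_py_spec : Claim_equal_keyword_cell_fallback_py := by
  intro s _
  unfold Spec_keyword_cell_fallback_py keyword_cell_fallback_py keyword_cell_fallback_py_alt
  rw [pv_priority_eq]
  have hlen : pvGroups.length = 5 := rfl
  simp only [List.foldl_append, pv_fold_const_group, hlen]
  generalize (["emergency", "hospital", "healthcare", "medical", "surgery", "ambulance", "rescue"].any
      (fun k => PySem.Str.isIn k (PySem.Str.lower s))) = b0
  generalize (["stadium", "concert", "match", "festival", "crowd", "event", "pilgrim", "gathering"].any
      (fun k => PySem.Str.isIn k (PySem.Str.lower s))) = b1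
  generalize (["iot", "sensor", "factory", "industrial", "robot", "scada", "agriculture", "farm"].any
      (fun k => PySem.Str.isIn k (PySem.Str.lower s))) = b2
  generalize (["transport", "vehicle", "highway", "drone", "traffic", "autonomous", "v2x"].any
      (fun k => PySem.Str.isIn k (PySem.Str.lower s))) = b3
  generalize (["gaming", "esport", "stream", "video", "conference"].any
      (fun k => PySem.Str.isIn k (PySem.Str.lower s))) = b4
  cases b0 <;> cases b1 <;> cases b2 <;> cases b3 <;> cases b4 <;> decide
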